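-- pv_equiv track=rewrite | github.com/imk0512/algorithm_practice | BAEKJOON/probrem/1862/answer.py | original_distance
-- ===== SOURCE A (Python) =====
-- def original_distance(n):
--     n = str(n)[::-1]  # Reverse the number for easier calculation
--     distance = 0
--     power = 0
--     for digit in n:
--         digit = int(digit)
--         if digit >= 5:
--             digit -= 1  # Adjust the digit if it is greater than or equal to 5
--         distance += digit * (9 ** power)  # Calculate the original distance
--         power += 1
--     return distance
-- ===== SOURCE B (Python) =====
-- def original_distance(n):
--     if n < 10:
--         return n - 1 if n >= 5 else n
--     q, r = divmod(n, 10)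
--     return original_distance(q) * 9 + (r - 1 if r >= 5 else r)
-- ===== Notes on version B (the rewrite author's own statement) =====
-- stated objective: alternative
-- what changed: B never touches the decimal string: it recurses arithmetically with divmod(n, 10), combining adjusted remainders Horner-style, instead of A's reverse-the-string digit scan with a power counter and 9**power exponentiation.
import Mathlib
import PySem

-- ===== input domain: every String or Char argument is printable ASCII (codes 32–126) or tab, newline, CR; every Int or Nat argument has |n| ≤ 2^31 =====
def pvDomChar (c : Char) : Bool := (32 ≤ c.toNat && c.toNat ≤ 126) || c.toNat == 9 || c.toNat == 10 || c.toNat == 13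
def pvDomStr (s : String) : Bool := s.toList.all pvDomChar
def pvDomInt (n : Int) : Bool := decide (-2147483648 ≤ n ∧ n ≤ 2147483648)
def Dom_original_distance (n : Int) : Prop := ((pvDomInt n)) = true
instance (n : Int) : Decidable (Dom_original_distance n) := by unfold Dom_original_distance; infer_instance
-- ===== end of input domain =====

-- B recurses arithmetically with divmod(n, 10) (Horner-style combination of adjusted
-- remainders) instead of A's reverse-the-string digit scan with a power counter and 9**power.


-- ===== PORT A =====
-- int(digit) on a single character: exact as c.toNat - 48 on digit characters, which is all
-- Pre_ admits (on n < 0 the string contains '-' and Python raises ValueError, excluded by Pre_).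
def pvDigit (c : Char) : Int := (c.toNat : Int) - 48

def original_distance (n : Int) : Int :=
  -- n = str(n)[::-1]; distance = 0; power = 0; for digit in n: …
  ((PySem.Int.toStr n).toList.reverse.foldl
    (fun (st : Int × Nat) c =>
      let d := pvDigit c
      let d := if d ≥ 5 then d - 1 else d
      (st.1 + d * 9 ^ st.2, st.2 + 1)) (0, 0)).1

-- ===== PORT B =====
-- divmod(n, 10): the divisor 10 is a nonzero literal, so the total floordiv/mod are exact.
def original_distance_alt (n : Int) : Int :=
  if n < 10 then (if n ≥ 5 then n - 1 else n)
  else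
    let q := PySem.Int.floordiv n 10
    let r := PySem.Int.mod n 10
    original_distance_alt q * 9 + (if r ≥ 5 then r - 1 else r)
termination_by n.toNat
decreasing_by
  rw [PySem.Int.floordiv_eq_ediv_of_pos (by omega)]
  omega

-- ===== PRECONDITION & SPEC =====
-- Pre_ excludes n < 0, where str(n) contains '-' and int('-') raises ValueError in A.
def Pre_original_distance (n : Int) : Prop := 0 ≤ n
instance (n : Int) : Decidable (Pre_original_distance n) := by unfold Pre_original_distance; infer_instance
def pvWitness_original_distance : Int := (7)

def Spec_original_distance (n : Int) (out : Int) : Prop := out = original_distance_alt n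
instance (n : Int) (out : Int) : Decidable (Spec_original_distance n out) := by unfold Spec_original_distance; infer_instance

-- ===== CLAIM (what is proved, stated in full; the proofs are below) =====
def Claim_equal_original_distance : Prop := ∀ (n : Int), Dom_original_distance n → Pre_original_distance n → Spec_original_distance n (original_distance n)

-- ===== LEMMAS AND PROOFS =====
def pvStepA (st : Int × Nat) (c : Char) : Int × Nat :=
  let d := pvDigit c
  let d := if d ≥ 5 then d - 1 else d
  (st.1 + d * 9 ^ st.2, st.2 + 1)

def pvStepB (acc : Int) (c : Char) : Int :=
  let d := pvDigit c
  let d := if d ≥ 5 then d - 1 else d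
  acc * 9 + d

-- the decimal digit characters of m, most significant first (= Nat.toDigits 10 m, proved below)
def pvDigits (m : Nat) : List Char :=
  if m < 10 then [Nat.digitChar m]
  else pvDigits (m / 10) ++ [Nat.digitChar (m % 10)]
decreasing_by exact Nat.div_lt_self (by omega) (by omega)

theorem pv_horner (l : List Char) (a : Int) (p : Nat) :
    (l.foldl pvStepA (a, p)).1 = a + 9 ^ p * (l.reverse.foldl pvStepB 0) := by
  induction l generalizing a p with
  | nil => simp
  | cons c t ih =>
      simp only [List.foldl_cons, List.reverse_cons, List.foldl_append, List.foldl_cons,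
        List.foldl_nil, pvStepA, pvStepB]
      rw [ih]
      ring

theorem pv_core (f : Nat) : ∀ (n : Nat) (acc : List Char), n < f →
    Nat.toDigitsCore 10 f n acc = pvDigits n ++ acc := by
  induction f with
  | zero => intro n acc h; omega
  | succ f ih =>
      intro n acc h
      rw [Nat.toDigitsCore]
      by_cases h10 : n < 10
      · have : n / 10 = 0 := by omega
        rw [pvDigits]
        simp [this, Nat.mod_eq_of_lt h10, h10]
      · have hq : n / 10 ≠ 0 := by omega
        simp only [hq, if_false]
        rw [ih (n / 10) _ (by omega)]
        conv_rhs => rw [pvDigits, if_neg h10]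
        rw [List.append_assoc]
        rfl

theorem pv_toDigits (m : Nat) : Nat.toDigits 10 m = pvDigits m := by
  have := pv_core (m + 1) m [] (by omega)
  simpa [Nat.toDigits] using this

theorem pv_digitChar (k : Nat) (h : k < 10) : pvDigit (Nat.digitChar k) = (k : Int) := by
  interval_cases k <;> decide

theorem pv_alt_horner (m : Nat) : original_distance_alt (m : Int) = (pvDigits m).foldl pvStepB 0 := by
  induction m using Nat.strong_induction_on with
  | _ m ih =>
    rw [original_distance_alt, pvDigits]
    by_cases h10 : m < 10
    · have hlt : (m : Int) < 10 := by omega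
      simp only [h10, hlt, if_true, List.foldl_cons, List.foldl_nil, pvStepB,
        pv_digitChar m h10]
      by_cases h5 : (m : Int) ≥ 5 <;> simp only [h5, if_true, if_false] <;> ring
    · have hlt : ¬ (m : Int) < 10 := by omega
      simp only [h10, hlt, if_false, List.foldl_append, List.foldl_cons, List.foldl_nil]
      rw [PySem.Int.floordiv_eq_ediv_of_pos (a := (m : Int)) (by omega),
          PySem.Int.mod_eq_emod_of_pos (a := (m : Int)) (by omega)]
      have hq : ((m : Int) / 10) = ((m / 10 : Nat) : Int) := by
        omega
      have hr : ((m : Int) % 10) = ((m % 10 : Nat) : Int) := by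
        omega
      rw [hq, hr, ih (m / 10) (Nat.div_lt_self (by omega) (by omega))]
      simp only [pvStepB, pv_digitChar (m % 10) (Nat.mod_lt m (by omega))]

-- ===== VERDICT (by name: the statement is the Claim_ definition above) =====
theorem original_distance_spec : Claim_equal_original_distance := by
  intro n _ hn
  replace hn : 0 ≤ n := hn
  show original_distance n = original_distance_alt n
  unfold original_distance
  rw [show (fun (st : Int × Nat) c =>
      let d := pvDigit c
      let d := if d ≥ 5 then d - 1 else d
      (st.1 + d * 9 ^ st.2, st.2 + 1)) = pvStepA from rfl, pv_horner]
  have hts : (PySem.Int.toStr n).toList = Nat.toDigits 10 n.toNat := by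
    rw [PySem.Int.toList_toStr, PySem.Int.toChars]
    rw [if_neg (by omega)]
  rw [hts, pv_toDigits, List.reverse_reverse]
  have := pv_alt_horner n.toNat
  rw [Int.toNat_of_nonneg hn] at this
  rw [← this]
  ring
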